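-- pv_equiv track=rewrite | github.com/paras-x11/paras | Assignment/Python/OLD Modules/Module-3 Collections, functions and Modules/42.py | find_unique_values
-- ===== SOURCE A (Python) =====
-- def find_unique_values(d1):
--     seen = set()
--     duplicate_vals = set()
--
--     for val in d1.values():
--         if val in seen:
--             duplicate_vals.add(val)
--         seen.add(val)
--
--     unique_val = seen - duplicate_vals
--
--     return list(unique_val)
-- ===== SOURCE B (Python) =====
-- def find_unique_values(d1):
--     vs = sorted(d1.values())
--     dups = {a for a, b in zip(vs, vs[1:]) if a == b}
--     return list(set(d1.values()) - dups)
-- ===== Notes on version B (the rewrite author's own statement) =====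
-- stated objective: alternative
-- what changed: B finds the duplicated values by sorting the value list and scanning adjacent pairs for equal neighbours (sort-then-scan), instead of A's single pass that incrementally maintains seen/duplicate membership sets, then subtracts them from set(values).
import Mathlib
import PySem

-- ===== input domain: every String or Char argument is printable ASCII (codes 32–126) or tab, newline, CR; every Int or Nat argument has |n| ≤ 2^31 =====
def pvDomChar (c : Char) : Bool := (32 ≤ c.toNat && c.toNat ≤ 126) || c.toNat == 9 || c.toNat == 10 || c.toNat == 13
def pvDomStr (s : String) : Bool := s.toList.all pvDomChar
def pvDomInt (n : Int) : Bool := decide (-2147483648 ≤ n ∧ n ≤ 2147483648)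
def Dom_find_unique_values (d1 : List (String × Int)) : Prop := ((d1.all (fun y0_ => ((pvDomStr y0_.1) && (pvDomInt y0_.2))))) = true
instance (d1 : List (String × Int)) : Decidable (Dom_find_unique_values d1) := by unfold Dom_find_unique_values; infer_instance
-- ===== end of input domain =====

-- B finds the duplicated values by sorting the value list and scanning adjacent pairs,
-- instead of A's incrementally-maintained seen/duplicate membership sets; same result proved.


-- ===== PORT A =====
-- loop body of A: 'if val in seen: duplicate_vals.add(val)' then 'seen.add(val)'
def stepA (st : PySem.Set Int × PySem.Set Int) (p : String × Int) :
    PySem.Set Int × PySem.Set Int :=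
  (PySem.Set.add st.1 p.2,
   if PySem.Set.contains st.1 p.2 then PySem.Set.add st.2 p.2 else st.2)

def find_unique_values (d1 : List (String × Int)) : List Int :=
  let st := d1.foldl stepA (PySem.Set.empty, PySem.Set.empty)
  PySem.Set.diff st.1 st.2

-- ===== PORT B =====
def find_unique_values_alt (d1 : List (String × Int)) : List Int :=
  let vs := PySem.List.sorted (d1.map (fun p => p.2)) (fun x => x) false
  let dups : PySem.Set Int :=
    PySem.Set.ofList (((vs.zip (PySem.List.slice vs (some 1) none)).filter
      (fun p => p.1 == p.2)).map (fun p => p.1))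
  PySem.Set.diff (PySem.Set.ofList (d1.map (fun p => p.2))) dups

-- ===== PRECONDITION & SPEC =====
def Spec_find_unique_values (d1 : List (String × Int)) (out : List Int) : Prop := out = find_unique_values_alt d1
instance (d1 : List (String × Int)) (out : List Int) : Decidable (Spec_find_unique_values d1 out) := by unfold Spec_find_unique_values; infer_instance

-- ===== CLAIM (what is proved, stated in full; the proofs are below) =====
def Claim_equal_find_unique_values : Prop := ∀ (d1 : List (String × Int)), Dom_find_unique_values d1 → Spec_find_unique_values d1 (find_unique_values d1)

-- ===== LEMMAS AND PROOFS =====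

-- A's 'seen' component is just set(values) built by successive adds
theorem foldA_fst (l : List (String × Int)) (s t : PySem.Set Int) :
    (l.foldl stepA (s, t)).1 = l.foldl (fun s p => PySem.Set.add s p.2) s := by
  induction l generalizing s t with
  | nil => rfl
  | cons p rest ih => simp only [List.foldl_cons, stepA]; exact ih _ _

-- membership in A's 'duplicate_vals' component
theorem foldA_snd_mem (l : List (String × Int)) (s t : PySem.Set Int) (x : Int) :
    x ∈ (l.foldl stepA (s, t)).2 ↔
      x ∈ t ∨ (x ∈ s ∧ x ∈ l.map (fun p => p.2)) ∨ 2 ≤ (l.map (fun p => p.2)).count x := by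
  induction l generalizing s t with
  | nil => simp
  | cons p rest ih =>
    simp only [List.foldl_cons, stepA, List.map_cons, List.count_cons, List.mem_cons]
    rw [ih]
    have hcm : x ∈ List.map (fun p => p.2) rest ↔ 1 ≤ (List.map (fun p => p.2) rest).count x :=
      ⟨fun h => List.count_pos_iff.mpr h, fun h => List.count_pos_iff.mp h⟩
    by_cases hvs : PySem.Set.contains s p.2 = true
    · rw [if_pos hvs]
      rw [PySem.Set.contains_iff] at hvs
      rw [PySem.Set.mem_add, PySem.Set.mem_add]
      by_cases hxv : x = p.2
      · have hb : (if p.2 == x then 1 else 0) = 1 := by simp [hxv]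
        rw [hb]
        exact iff_of_true (Or.inl (Or.inr hxv))
          (Or.inr (Or.inl ⟨hxv ▸ hvs, Or.inl hxv⟩))
      · have hne : (p.2 == x) = false := by
          simp only [beq_eq_false_iff_ne]; exact fun h => hxv h.symm
        simp only [hne]
        constructor
        · rintro ((h | h) | ⟨(h1 | h1), h2⟩ | h)
          · exact Or.inl h
          · exact absurd h hxv
          · exact Or.inr (Or.inl ⟨h1, Or.inr h2⟩)
          · exact absurd h1 hxv
          · exact Or.inr (Or.inr h)
        · rintro (h | ⟨h1, (h2 | h2)⟩ | h)
          · exact Or.inl (Or.inl h)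
          · exact absurd h2 hxv
          · exact Or.inr (Or.inl ⟨Or.inl h1, h2⟩)
          · exact Or.inr (Or.inr h)
    · rw [if_neg hvs]
      rw [PySem.Set.contains_iff] at hvs
      rw [PySem.Set.mem_add]
      by_cases hxv : x = p.2
      · have hb : (if p.2 == x then 1 else 0) = 1 := by simp [hxv]
        rw [hb]
        constructor
        · rintro (h | ⟨(h1 | h1), h2⟩ | h)
          · exact Or.inl h
          · exact absurd (hxv ▸ h1) hvs
          · exact Or.inr (Or.inr (by have := hcm.mp h2; omega))
          · exact Or.inr (Or.inr (by omega))
        · rintro (h | ⟨h1, _⟩ | h)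
          · exact Or.inl h
          · exact absurd (hxv ▸ h1) hvs
          · exact Or.inr (Or.inl ⟨Or.inr hxv, hcm.mpr (by omega)⟩)
      · have hne : (p.2 == x) = false := by
          simp only [beq_eq_false_iff_ne]; exact fun h => hxv h.symm
        simp only [hne]
        constructor
        · rintro (h | ⟨(h1 | h1), h2⟩ | h)
          · exact Or.inl h
          · exact Or.inr (Or.inl ⟨h1, Or.inr h2⟩)
          · exact absurd h1 hxv
          · exact Or.inr (Or.inr h)
        · rintro (h | ⟨h1, (h2 | h2)⟩ | h)
          · exact Or.inl h
          · exact absurd h2 hxv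
          · exact Or.inr (Or.inl ⟨Or.inl h1, h2⟩)
          · exact Or.inr (Or.inr h)

-- in a ≤-sorted list, a value has an equal adjacent neighbour iff it occurs at least twice
theorem adj_pair_iff_count (l : List Int) (h : l.Pairwise (· ≤ ·)) (x : Int) :
    (x, x) ∈ l.zip l.tail ↔ 2 ≤ l.count x := by
  induction l with
  | nil => simp
  | cons a t ih =>
    cases t with
    | nil =>
      by_cases hab : a = x <;> simp [hab]
    | cons b t' =>
      have hp := List.pairwise_cons.mp h
      have ha : ∀ y ∈ b :: t', a ≤ y := hp.1
      have ht : (b :: t').Pairwise (· ≤ ·) := hp.2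
      have hzip : (a :: b :: t').zip (a :: b :: t').tail
          = (a, b) :: ((b :: t').zip (b :: t').tail) := rfl
      rw [hzip, List.mem_cons, ih ht]
      by_cases hxa : x = a
      · subst hxa
        by_cases hxb : x = b
        · subst hxb
          have hcount : 2 ≤ List.count x (x :: x :: t') := by
            simp
          exact iff_of_true (Or.inl rfl) hcount
        · have hnot : x ∉ b :: t' := by
            intro hm
            rcases List.mem_cons.mp hm with h1 | h1
            · exact hxb h1
            · have h2 : b ≤ x := List.rel_of_pairwise_cons ht h1
              have h3 : x ≤ b := ha b List.mem_cons_self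
              exact hxb (le_antisymm h3 h2)
          have hc0 : List.count x (b :: t') = 0 := List.count_eq_zero.mpr hnot
          have hc1 : List.count x (x :: b :: t') = 1 := by
            rw [List.count_cons_self, hc0]
          constructor
          · rintro (h1 | h1)
            · exact absurd (Prod.ext_iff.mp h1).2 hxb
            · omega
          · intro h1; rw [hc1] at h1; omega
      · have hcc : List.count x (a :: b :: t') = List.count x (b :: t') := by
          rw [List.count_cons_of_ne (fun h1 => hxa h1.symm)]
        rw [hcc]
        constructor
        · rintro (h1 | h1)
          · exact absurd (Prod.ext_iff.mp h1).1 hxa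
          · exact h1
        · intro h1; exact Or.inr h1

-- ===== VERDICT (by name: the statement is the Claim_ definition above) =====
theorem find_unique_values_spec : Claim_equal_find_unique_values := by
  intro d1 _
  unfold Spec_find_unique_values find_unique_values find_unique_values_alt
  simp only
  set vals := d1.map (fun p => p.2) with hvals
  set vs := PySem.List.sorted vals (fun x => x) false with hvs
  have hfst : (d1.foldl stepA (PySem.Set.empty, PySem.Set.empty)).1
      = PySem.Set.ofList vals := by
    rw [foldA_fst]
    rw [show (PySem.Set.empty : PySem.Set Int) = [] from rfl,
      ← PySem.Set.update_map_eq_foldl_add, PySem.Set.update_nil_left]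
  unfold PySem.Set.diff
  rw [hfst]
  apply List.filter_congr
  intro x _
  have hperm : vs.Perm vals := PySem.List.sorted_perm vals (fun x => x) false
  have hpair : vs.Pairwise (· ≤ ·) := by
    have := PySem.List.sorted_pairwise vals (fun x : Int => x)
    simpa using this
  have hdupA : x ∈ (d1.foldl stepA (PySem.Set.empty, PySem.Set.empty)).2 ↔
      2 ≤ vals.count x := by
    rw [foldA_snd_mem]
    simp [PySem.Set.empty, hvals]
  have hdupB : x ∈ PySem.Set.ofList (((vs.zip (PySem.List.slice vs (some 1) none)).filter
      (fun p => p.1 == p.2)).map (fun p => p.1)) ↔ 2 ≤ vals.count x := by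
    rw [PySem.Set.mem_ofList, PySem.List.slice_from_one]
    rw [← hperm.count_eq x, ← adj_pair_iff_count vs hpair x]
    simp only [List.mem_map, List.mem_filter, beq_iff_eq]
    constructor
    · rintro ⟨⟨p1, p2⟩, ⟨hp, hpe⟩, hp1⟩
      dsimp at hpe hp1
      subst hp1; subst hpe
      exact hp
    · intro h; exact ⟨(x, x), ⟨h, rfl⟩, rfl⟩
  congr 1
  rw [Bool.eq_iff_iff, PySem.Set.contains_iff, PySem.Set.contains_iff]
  exact hdupA.trans hdupB.symm
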